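-- pv_equiv track=rewrite | github.com/869277160/MyLeetCode | 2293.极大极小游戏.py | minMaxGame
-- ===== SOURCE A (Python) =====
-- from typing import List
--
-- def minMaxGame(nums: List[int]) -> int:
--     if len(nums) == 1:
--         return nums[0]
--
--     while len(nums) > 1:
--         Newnums = []
--         for i in range(0,len(nums),2):
--             if (i//2) % 2 == 0:
--                 Newnums += [min(nums[i],nums[i+1])]
--             else :
--                 Newnums += [max(nums[i],nums[i+1])]
--
--         nums = Newnums
--
--     return nums[0]
-- ===== SOURCE B (Python) =====
-- from typing import List
--
-- def minMaxGame(nums: List[int]) -> int: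
--     if len(nums) <= 1:
--         return nums[0]
--     out = []
--     take_min = True
--     it = iter(nums)
--     for a, b in zip(it, it):
--         out.append(min(a, b) if take_min else max(a, b))
--         take_min = not take_min
--     return minMaxGame(out)
-- ===== Notes on version B (the rewrite author's own statement) =====
-- stated objective: simpler
-- what changed: A's outer while-loop with an index loop over range(0,len,2) and the parity test (i//2)%2 becomes a recursion on the shrinking array whose round consumes the elements pairwise via zip(it,it) with a flipping min/max toggle, with no index arithmetic.
import Mathlib
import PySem

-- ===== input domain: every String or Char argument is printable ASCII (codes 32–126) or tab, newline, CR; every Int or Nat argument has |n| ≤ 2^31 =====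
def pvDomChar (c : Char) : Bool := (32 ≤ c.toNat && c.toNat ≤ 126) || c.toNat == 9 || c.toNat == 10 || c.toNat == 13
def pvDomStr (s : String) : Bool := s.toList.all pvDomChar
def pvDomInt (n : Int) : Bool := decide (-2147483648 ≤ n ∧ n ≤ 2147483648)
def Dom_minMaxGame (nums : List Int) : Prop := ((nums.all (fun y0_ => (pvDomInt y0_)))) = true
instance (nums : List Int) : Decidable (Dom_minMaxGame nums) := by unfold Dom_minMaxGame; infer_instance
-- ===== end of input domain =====

-- B changes the decomposition: A's while-loop with an index loop `range(0,len,2)` and the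
-- parity test `(i//2)%2` becomes a recursion on the shrinking array whose round pairs the
-- elements positionally (zip) with a flipping min/max toggle; objective: simpler (index-free).

-- ===== PORT A =====
-- one round of A's inner for-loop; out-of-range indices (excluded by Pre_, Python raises
-- IndexError there) are read through pyGetD with default 0
def aRound (nums : List Int) : List Int :=
  (PySem.List.pyRange 0 nums.length 2).foldl
    (fun acc i =>
      if PySem.Int.mod (PySem.Int.floordiv i 2) 2 == 0 then
        acc ++ [min (PySem.List.pyGetD nums i 0) (PySem.List.pyGetD nums (i+1) 0)]
      else
        acc ++ [max (PySem.List.pyGetD nums i 0) (PySem.List.pyGetD nums (i+1) 0)])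
    []

theorem aRound_step_eq (nums : List Int) :
    (fun (acc : List Int) (i : Int) =>
      if PySem.Int.mod (PySem.Int.floordiv i 2) 2 == 0 then
        acc ++ [min (PySem.List.pyGetD nums i 0) (PySem.List.pyGetD nums (i+1) 0)]
      else
        acc ++ [max (PySem.List.pyGetD nums i 0) (PySem.List.pyGetD nums (i+1) 0)])
    = (fun acc i => acc ++ [if PySem.Int.mod (PySem.Int.floordiv i 2) 2 == 0 then
         min (PySem.List.pyGetD nums i 0) (PySem.List.pyGetD nums (i+1) 0)
       else max (PySem.List.pyGetD nums i 0) (PySem.List.pyGetD nums (i+1) 0)]) := by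
  funext acc i; split <;> rfl

theorem aRound_length (nums : List Int) :
    (aRound nums).length = (if 0 < nums.length then (nums.length + 1) / 2 else 0) := by
  unfold aRound
  rw [aRound_step_eq, PySem.List.foldl_append_singleton_eq_map]
  rw [PySem.List.pyRange_of_pos 0 nums.length (by norm_num)]
  simp only [List.nil_append, List.length_map, List.length_range]
  split
  · rename_i hp
    rw [if_pos (by exact_mod_cast hp)]; omega
  · rename_i hp
    rw [if_neg (by exact_mod_cast hp)]

-- A's while-loop
def minMaxGameLoop (nums : List Int) : List Int :=
  if 1 < nums.length then minMaxGameLoop (aRound nums) else nums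
termination_by nums.length
decreasing_by
  have hl := aRound_length nums
  rw [if_pos (by omega)] at hl
  omega

def minMaxGame (nums : List Int) : Int :=
  if nums.length == 1 then PySem.List.pyGetD nums 0 0
  else PySem.List.pyGetD (minMaxGameLoop nums) 0 0

-- ===== PORT B =====
-- Source B's round loop: `for a, b in zip(it, it)` consuming pairs, with the take_min toggle
def roundAlt : Bool → List Int → List Int
  | t, a :: b :: rest => (if t then min a b else max a b) :: roundAlt (!t) rest
  | _, _ => []

theorem roundAlt_length : ∀ (t : Bool) (xs : List Int),
    (roundAlt t xs).length = xs.length / 2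
  | t, a :: b :: rest => by simp [roundAlt, roundAlt_length (!t) rest]; omega
  | _, [] => by simp [roundAlt]
  | _, [a] => by simp [roundAlt]

def minMaxGame_alt (nums : List Int) : Int :=
  if nums.length ≤ 1 then PySem.List.pyGetD nums 0 0
  else minMaxGame_alt (roundAlt true nums)
termination_by nums.length
decreasing_by
  have hl := roundAlt_length true nums
  omega

-- ===== PRECONDITION & SPEC =====
-- A raises IndexError unless the length is a power of two: the empty list fails the final
-- read of the first element, and any other non-power-of-two length reaches an odd-length
-- round where the read one past an even index i falls out of range.
def Pre_minMaxGame (nums : List Int) : Prop :=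
  nums.length = 2 ^ Nat.log2 nums.length
instance (nums : List Int) : Decidable (Pre_minMaxGame nums) := by
  unfold Pre_minMaxGame; infer_instance

def pvWitness_minMaxGame : List Int := [4, 1, 7, 2]

def Spec_minMaxGame (nums : List Int) (out : Int) : Prop := out = minMaxGame_alt nums
instance (nums : List Int) (out : Int) : Decidable (Spec_minMaxGame nums out) := by
  unfold Spec_minMaxGame; infer_instance

-- ===== CLAIM (what is proved, stated in full; the proofs are below) =====
def Claim_equal_minMaxGame : Prop := ∀ (nums : List Int), Dom_minMaxGame nums →
  Pre_minMaxGame nums → Spec_minMaxGame nums (minMaxGame nums)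

-- ===== LEMMAS AND PROOFS =====

-- A's round as a map over pair indices
theorem aRound_eq_map (nums : List Int) (h : 0 < nums.length) :
    aRound nums = (List.range ((nums.length + 1) / 2)).map
      (fun k => if k % 2 == 0 then min (nums.getD (2 * k) 0) (nums.getD (2 * k + 1) 0)
                else max (nums.getD (2 * k) 0) (nums.getD (2 * k + 1) 0)) := by
  unfold aRound
  rw [aRound_step_eq, PySem.List.foldl_append_singleton_eq_map,
      PySem.List.pyRange_of_pos 0 nums.length (by norm_num), if_pos (by exact_mod_cast h)]
  rw [List.map_map]
  have hn : ((nums.length : Int) - 0 + 2 - 1) / 2 = ((nums.length + 1) / 2 : Nat) := by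
    omega
  rw [hn, Int.toNat_natCast, List.nil_append]
  apply List.map_congr_left
  intro k hk
  simp only [Function.comp]
  have h1 : PySem.Int.floordiv (0 + 2 * (k:Int)) 2 = (k:Int) := by
    simp [PySem.Int.floordiv]
  have h2 : PySem.Int.mod (k:Int) 2 = ((k % 2 : Nat) : Int) := by
    simp [PySem.Int.mod, Int.fmod_eq_emod]
  rw [h1, h2]
  have h3 : (0 + 2 * (k:Int)) = ((2*k : Nat) : Int) := by push_cast; ring
  have h4 : (0 + 2 * (k:Int) + 1) = ((2*k+1 : Nat) : Int) := by push_cast; ring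
  rw [h4, h3, PySem.List.pyGetD_natCast, PySem.List.pyGetD_natCast]
  rcases Nat.mod_two_eq_zero_or_one k with hp | hp <;> simp [hp]

-- the map form is B's toggled pair recursion, for even-length lists
theorem map_eq_roundAlt : ∀ (m : Nat) (xs : List Int) (j : Nat) (t : Bool),
    xs.length = 2 * m → (t = (j % 2 == 0)) →
    (List.range m).map
      (fun k => if (j + k) % 2 == 0 then min (xs.getD (2 * k) 0) (xs.getD (2 * k + 1) 0)
                else max (xs.getD (2 * k) 0) (xs.getD (2 * k + 1) 0)) = roundAlt t xs := by
  intro m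
  induction m with
  | zero =>
    intro xs j t hlen _
    have : xs = [] := List.eq_nil_of_length_eq_zero (by omega)
    subst this; simp [roundAlt]
  | succ m ih =>
    intro xs j t hlen ht
    match xs, hlen with
    | a :: b :: rest, hlen =>
      have hr : rest.length = 2 * m := by simp at hlen; omega
      rw [List.range_succ_eq_map, List.map_cons, List.map_map]
      have hhead : (if (j + 0) % 2 == 0 then
            min ((a :: b :: rest).getD (2 * 0) 0) ((a :: b :: rest).getD (2 * 0 + 1) 0)
          else max ((a :: b :: rest).getD (2 * 0) 0) ((a :: b :: rest).getD (2 * 0 + 1) 0))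
          = (if t then min a b else max a b) := by
        subst ht; simp
      have htail : (List.range m).map ((fun k =>
            if (j + k) % 2 == 0 then
              min ((a :: b :: rest).getD (2 * k) 0) ((a :: b :: rest).getD (2 * k + 1) 0)
            else max ((a :: b :: rest).getD (2 * k) 0) ((a :: b :: rest).getD (2 * k + 1) 0))
            ∘ Nat.succ)
          = roundAlt (!t) rest := by
        rw [show ((fun k =>
            if (j + k) % 2 == 0 then
              min ((a :: b :: rest).getD (2 * k) 0) ((a :: b :: rest).getD (2 * k + 1) 0)
            else max ((a :: b :: rest).getD (2 * k) 0) ((a :: b :: rest).getD (2 * k + 1) 0))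
            ∘ Nat.succ)
          = (fun k =>
            if ((j+1) + k) % 2 == 0 then min (rest.getD (2 * k) 0) (rest.getD (2 * k + 1) 0)
            else max (rest.getD (2 * k) 0) (rest.getD (2 * k + 1) 0)) from ?_]
        · exact ih rest (j+1) (!t) hr (by
            rcases Nat.mod_two_eq_zero_or_one j with hp | hp <;>
              simp [ht, hp, Nat.add_mod j 1 2])
        · funext k
          simp only [Function.comp, Nat.succ_eq_add_one]
          have e1 : 2 * (k + 1) = (2 * k + 1) + 1 := by ring
          have e2 : 2 * (k + 1) + 1 = (2 * k + 1 + 1) + 1 := by ring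
          have e3 : j + (k + 1) = (j + 1) + k := by ring
          rw [e2, e1, e3]
          simp
      rw [hhead, htail, roundAlt]

theorem aRound_eq_roundAlt (nums : List Int) (m : Nat) (h : nums.length = 2 * m) :
    aRound nums = roundAlt true nums := by
  rcases Nat.eq_zero_or_pos m with hm | hm
  · subst hm
    have : nums = [] := List.eq_nil_of_length_eq_zero (by omega)
    subst this
    have : (aRound []).length = 0 := by rw [aRound_length]; simp
    rw [List.eq_nil_of_length_eq_zero this]; rfl
  · rw [aRound_eq_map nums (by omega)]
    have hq : (nums.length + 1) / 2 = m := by omega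
    rw [hq]
    simpa using map_eq_roundAlt m nums 0 true h rfl

theorem loop_eq_alt : ∀ (k : Nat) (xs : List Int), xs.length = 2 ^ k →
    PySem.List.pyGetD (minMaxGameLoop xs) 0 0 = minMaxGame_alt xs := by
  intro k
  induction k with
  | zero =>
    intro xs hlen
    rw [minMaxGameLoop, if_neg (by omega), minMaxGame_alt, if_pos (by omega)]
  | succ k ih =>
    intro xs hlen
    have h2 : 1 < xs.length := by rw [hlen]; exact Nat.one_lt_two_pow (by omega)
    rw [minMaxGameLoop, if_pos h2, minMaxGame_alt, if_neg (by omega)]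
    rw [aRound_eq_roundAlt xs (2 ^ k) (by rw [hlen]; ring)]
    exact ih (roundAlt true xs) (by rw [roundAlt_length, hlen, pow_succ]; omega)

-- ===== VERDICT (by name: the statement is the Claim_ definition above) =====
theorem minMaxGame_spec : Claim_equal_minMaxGame := by
  intro nums _ hpre
  unfold Spec_minMaxGame minMaxGame
  split
  · rename_i h1
    rw [minMaxGame_alt, if_pos (by simp at h1; omega)]
  · exact loop_eq_alt (Nat.log2 nums.length) nums hpre
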